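-- pv_equiv track=rewrite | github.com/lyeeonardo/football | dataset_pipeline/splitting.py | _select_positive_donor
-- ===== SOURCE A (Python) =====
-- from typing import Any, Dict, Iterable, List, Tuple, TYPE_CHECKING
--
-- def _select_positive_donor(
--
--     split_positive_sessions: Dict[str, int],
--     exclude: str,
-- ) -> str | None:
--     donors = [
--         name
--         for name, positives in split_positive_sessions.items()
--         if name != exclude and positives > 1
--     ]
--     if not donors:
--         donors = [
--             name
--             for name, positives in split_positive_sessions.items()
--             if name != exclude and positives > 0
--         ]
--     if not donors:
--         return None
--     return max(donors, key=lambda name: split_positive_sessions[name])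
-- ===== SOURCE B (Python) =====
-- def _select_positive_donor(
--     split_positive_sessions,
--     exclude,
-- ):
--     best_high = None  # (name, positives) with positives > 1
--     best_low = None   # (name, positives) with positives > 0
--     for name, positives in split_positive_sessions.items():
--         if name != exclude and positives > 0:
--             if best_low is None or positives > best_low[1]:
--                 best_low = (name, positives)
--             if positives > 1 and (best_high is None or positives > best_high[1]):
--                 best_high = (name, positives)
--     if best_high is not None:
--         return best_high[0]
--     if best_low is not None:
--         return best_low[0]
--     return None
-- ===== Notes on version B (the rewrite author's own statement) =====
-- stated objective: alternative
-- what changed: Replaced A's two filtered list comprehensions plus max(..., key=dict lookup) with a single pass over the items maintaining two running (name, positives) maxima (best for positives>1 and for positives>0), updating only on strict improvement to keep max's first-maximum tie-breaking.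
import Mathlib
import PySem

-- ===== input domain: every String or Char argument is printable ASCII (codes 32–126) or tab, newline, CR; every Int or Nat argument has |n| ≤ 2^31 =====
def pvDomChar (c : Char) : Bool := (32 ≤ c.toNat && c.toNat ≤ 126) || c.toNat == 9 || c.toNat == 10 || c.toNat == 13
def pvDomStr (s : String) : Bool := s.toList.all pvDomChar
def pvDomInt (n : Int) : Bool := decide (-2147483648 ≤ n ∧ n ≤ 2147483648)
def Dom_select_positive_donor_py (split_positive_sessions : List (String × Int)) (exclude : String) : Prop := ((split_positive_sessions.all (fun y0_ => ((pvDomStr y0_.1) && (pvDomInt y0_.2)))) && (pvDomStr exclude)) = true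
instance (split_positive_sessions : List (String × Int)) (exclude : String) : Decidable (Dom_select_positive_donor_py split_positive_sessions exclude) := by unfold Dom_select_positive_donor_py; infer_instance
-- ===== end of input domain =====

-- B replaces A's two comprehensions + max(..., key=dict lookup) by a single pass keeping two
-- running (name, positives) maxima; same return value, one traversal, no lookups (objective: simpler/alternative).

-- ===== PORT A =====
-- literal transliteration of A: two filtered comprehensions, then Python's max with key = dict lookup
-- (max over a nonempty list = fold from the head, updating only on strict improvement, as Python's max does).
def select_positive_donor_py (split_positive_sessions : List (String × Int)) (exclude : String) : Option String :=
  let donors := (split_positive_sessions.filter (fun nv => nv.1 != exclude && nv.2 > 1)).map Prod.fst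
  let donors := if donors.isEmpty then (split_positive_sessions.filter (fun nv => nv.1 != exclude && nv.2 > 0)).map Prod.fst else donors
  match donors with
  | [] => none
  | h :: t => some (t.foldl (fun best n =>
      if (PySem.Dict.mk split_positive_sessions).getD n 0 > (PySem.Dict.mk split_positive_sessions).getD best 0 then n else best) h)

-- ===== PORT B =====
-- B-side helper: update a running (name, positives) maximum on strict improvement
def pvBest (b : Option (String × Int)) (nv : String × Int) : Option (String × Int) :=
  match b with
  | none => some nv
  | some p => if nv.2 > p.2 then some nv else some p

def select_positive_donor_py_alt (split_positive_sessions : List (String × Int)) (exclude : String) : Option String :=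
  let st := split_positive_sessions.foldl
    (fun (acc : Option (String × Int) × Option (String × Int)) nv =>
      if nv.1 != exclude && nv.2 > 0 then
        (if nv.2 > 1 then pvBest acc.1 nv else acc.1, pvBest acc.2 nv)
      else acc) (none, none)
  match st.1 with
  | some p => some p.1
  | none =>
    match st.2 with
    | some p => some p.1
    | none => none

-- ===== PRECONDITION & SPEC =====
-- Pre_ excludes association lists with duplicate keys: no Python dict has duplicate keys (dict
-- construction collapses them), so such lists represent no input of the original function.
def Pre_select_positive_donor_py (split_positive_sessions : List (String × Int)) (exclude : String) : Prop :=
  (split_positive_sessions.map Prod.fst).Nodup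

instance (split_positive_sessions : List (String × Int)) (exclude : String) : Decidable (Pre_select_positive_donor_py split_positive_sessions exclude) := by unfold Pre_select_positive_donor_py; infer_instance

def pvWitness_select_positive_donor_py : (List (String × Int)) × String := ([("a", 2), ("b", 1)], "c")

def Spec_select_positive_donor_py (split_positive_sessions : List (String × Int)) (exclude : String) (out : Option String) : Prop := out = select_positive_donor_py_alt split_positive_sessions exclude
instance (split_positive_sessions : List (String × Int)) (exclude : String) (out : Option String) : Decidable (Spec_select_positive_donor_py split_positive_sessions exclude out) := by unfold Spec_select_positive_donor_py; infer_instance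

-- ===== CLAIM (what is proved, stated in full; the proofs are below) =====
def Claim_equal_select_positive_donor_py : Prop := ∀ (split_positive_sessions : List (String × Int)) (exclude : String), Dom_select_positive_donor_py split_positive_sessions exclude → Pre_select_positive_donor_py split_positive_sessions exclude → Spec_select_positive_donor_py split_positive_sessions exclude (select_positive_donor_py split_positive_sessions exclude)

-- ===== LEMMAS AND PROOFS =====

-- total version of pvBest once the accumulator is set
def pvStep (b : String × Int) (nv : String × Int) : String × Int :=
  if nv.2 > b.2 then nv else b

theorem foldl_pvBest_some (fl : List (String × Int)) (b : String × Int) :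
    fl.foldl pvBest (some b) = some (fl.foldl pvStep b) := by
  induction fl generalizing b with
  | nil => rfl
  | cons nv t ih =>
      simp only [List.foldl, pvBest, pvStep]
      split_ifs <;> exact ih _

theorem foldl_pvBest_none (h : String × Int) (t : List (String × Int)) :
    (h :: t).foldl pvBest none = some (t.foldl pvStep h) := by
  rw [List.foldl_cons]; exact foldl_pvBest_some t h

-- B's single pass computes the two filtered folds
theorem foldB_split (d : List (String × Int)) (exclude : String)
    (h l : Option (String × Int)) :
    d.foldl (fun (acc : Option (String × Int) × Option (String × Int)) nv =>
        if nv.1 != exclude && nv.2 > 0 then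
          (if nv.2 > 1 then pvBest acc.1 nv else acc.1, pvBest acc.2 nv)
        else acc) (h, l)
    = ((d.filter (fun nv => nv.1 != exclude && nv.2 > 1)).foldl pvBest h,
       (d.filter (fun nv => nv.1 != exclude && nv.2 > 0)).foldl pvBest l) := by
  induction d generalizing h l with
  | nil => rfl
  | cons nv t ih =>
      rw [List.foldl_cons, List.filter_cons, List.filter_cons]
      by_cases hlow : (nv.1 != exclude && nv.2 > 0) = true
      · rw [if_pos hlow]
        by_cases hhi : nv.2 > 1
        · have hh : (nv.1 != exclude && nv.2 > 1) = true := by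
            simp only [Bool.and_eq_true, decide_eq_true_eq] at hlow ⊢
            exact ⟨hlow.1, hhi⟩
          rw [if_pos hhi, if_pos hh, if_pos hlow, List.foldl_cons, List.foldl_cons, ih]
        · have hh : ¬ (nv.1 != exclude && nv.2 > 1) = true := by
            simp only [Bool.and_eq_true, decide_eq_true_eq, not_and]
            intro _; exact hhi
          rw [if_neg hhi, if_neg hh, if_pos hlow, List.foldl_cons, ih]
      · have hh : ¬ (nv.1 != exclude && nv.2 > 1) = true := by
          intro hcon
          apply hlow
          simp only [Bool.and_eq_true, decide_eq_true_eq] at hcon ⊢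
          exact ⟨hcon.1, by omega⟩
        rw [if_neg hlow, if_neg hh, if_neg hlow, ih]

-- with distinct keys, looking up an entry of d gives that entry's value
theorem lookup_entry (d : List (String × Int)) (hnd : (d.map Prod.fst).Nodup)
    (nv : String × Int) (hm : nv ∈ d) :
    (PySem.Dict.mk d).getD nv.1 0 = nv.2 :=
  PySem.Dict.getD_of_mem_items (d := PySem.Dict.mk d) (k := nv.1) (v := nv.2) hm hnd 0

-- A's name-fold with dict lookups equals the pair-fold when lookups are faithful
theorem fold_names_eq (d : List (String × Int)) (fl : List (String × Int))
    (hfl : ∀ nv ∈ fl, (PySem.Dict.mk d).getD nv.1 0 = nv.2)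
    (b : String × Int) (hb : (PySem.Dict.mk d).getD b.1 0 = b.2) :
    (fl.map Prod.fst).foldl (fun best n =>
        if (PySem.Dict.mk d).getD n 0 > (PySem.Dict.mk d).getD best 0 then n else best) b.1
    = (fl.foldl pvStep b).1 := by
  induction fl generalizing b with
  | nil => rfl
  | cons nv t ih =>
      have hnv := hfl nv (List.mem_cons_self ..)
      simp only [List.map, List.foldl, pvStep, hnv, hb]
      split_ifs with hc
      · exact ih (fun x hx => hfl x (List.mem_cons_of_mem _ hx)) nv hnv
      · exact ih (fun x hx => hfl x (List.mem_cons_of_mem _ hx)) b hb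

theorem select_positive_donor_py_spec : Claim_equal_select_positive_donor_py := by
  intro d exclude _ hpre
  unfold Spec_select_positive_donor_py select_positive_donor_py select_positive_donor_py_alt
  rw [foldB_split]
  have hfaith : ∀ (p : (String × Int) → Bool) (nv : String × Int),
      nv ∈ d.filter p → (PySem.Dict.mk d).getD nv.1 0 = nv.2 := by
    intro p nv hm
    exact lookup_entry d hpre nv (List.mem_of_mem_filter hm)
  cases hH : d.filter (fun nv => nv.1 != exclude && nv.2 > 1) with
  | cons nvh th =>
      rw [foldl_pvBest_none]
      have := fold_names_eq d th
        (fun x hx => hfaith _ x (hH ▸ List.mem_cons_of_mem _ hx)) nvh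
        (hfaith _ nvh (hH ▸ List.mem_cons_self ..))
      simp [this]
  | nil =>
      simp only [List.map_nil, List.isEmpty_nil, if_true]
      cases hL : d.filter (fun nv => nv.1 != exclude && nv.2 > 0) with
      | nil => rfl
      | cons nvl tl =>
          rw [foldl_pvBest_none]
          have := fold_names_eq d tl
            (fun x hx => hfaith _ x (hL ▸ List.mem_cons_of_mem _ hx)) nvl
            (hfaith _ nvl (hL ▸ List.mem_cons_self ..))
          simp [this]
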